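-- pv_equiv track=rewrite | github.com/mshafei721/ADOS | dev-agent-system/crews/orchestrator/orchestrator_crew.py | _analyze_task_for_crew
-- ===== SOURCE A (Python) =====
-- def _analyze_task_for_crew(task_description: str) -> str:
--     """Analyze task description to determine best crew"""
--     task_lower = task_description.lower()
--
--     # Advanced keyword-based routing with scoring
--     crew_scores = {
--         "backend": 0,
--         "security": 0,
--         "quality": 0,
--         "deployment": 0,
--         "frontend": 0,
--         "integration": 0,
--         "orchestrator": 0
--     }
--
--     # Backend keywords
--     backend_keywords = ["api", "backend", "database", "server", "endpoint", "model", "schema"]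
--     crew_scores["backend"] = sum(1 for keyword in backend_keywords if keyword in task_lower)
--
--     # Security keywords
--     security_keywords = ["security", "auth", "vulnerability", "encrypt", "token", "permission"]
--     crew_scores["security"] = sum(1 for keyword in security_keywords if keyword in task_lower)
--
--     # Quality keywords
--     quality_keywords = ["test", "quality", "lint", "review", "validate", "check"]
--     crew_scores["quality"] = sum(1 for keyword in quality_keywords if keyword in task_lower)
--
--     # Deployment keywords
--     deployment_keywords = ["deploy", "docker", "kubernetes", "cloud", "container", "helm"]
--     crew_scores["deployment"] = sum(1 for keyword in deployment_keywords if keyword in task_lower)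
--
--     # Frontend keywords
--     frontend_keywords = ["ui", "frontend", "react", "component", "style", "css"]
--     crew_scores["frontend"] = sum(1 for keyword in frontend_keywords if keyword in task_lower)
--
--     # Integration keywords
--     integration_keywords = ["integration", "ci/cd", "pipeline", "webhook", "sync"]
--     crew_scores["integration"] = sum(1 for keyword in integration_keywords if keyword in task_lower)
--
--     # Orchestrator keywords
--     orchestrator_keywords = ["orchestrate", "coordinate", "manage", "plan", "decompose"]
--     crew_scores["orchestrator"] = sum(1 for keyword in orchestrator_keywords if keyword in task_lower)
--
--     # Find best crew
--     best_crew = max(crew_scores, key=crew_scores.get)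
--
--     # Default to orchestrator if no clear match
--     if crew_scores[best_crew] == 0:
--         best_crew = "orchestrator"
--
--     return best_crew
-- ===== SOURCE B (Python) =====
-- _CREW_KEYWORDS = [
--     ("backend", ["api", "backend", "database", "server", "endpoint", "model", "schema"]),
--     ("security", ["security", "auth", "vulnerability", "encrypt", "token", "permission"]),
--     ("quality", ["test", "quality", "lint", "review", "validate", "check"]),
--     ("deployment", ["deploy", "docker", "kubernetes", "cloud", "container", "helm"]),
--     ("frontend", ["ui", "frontend", "react", "component", "style", "css"]),
--     ("integration", ["integration", "ci/cd", "pipeline", "webhook", "sync"]),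
--     ("orchestrator", ["orchestrate", "coordinate", "manage", "plan", "decompose"]),
-- ]
--
-- _ALL_KEYWORDS = [kw for _, kws in _CREW_KEYWORDS for kw in kws]
--
--
-- def _analyze_task_for_crew(task_description: str) -> str:
--     # Single left-to-right scan of the text: at each position record which
--     # keywords start there, instead of one substring search per keyword.
--     t = task_description.lower()
--     matched = set()
--     for i in range(len(t)):
--         for kw in _ALL_KEYWORDS:
--             if kw not in matched and t.startswith(kw, i):
--                 matched.add(kw)
--     best_crew, best_score = "orchestrator", 0
--     for crew, kws in _CREW_KEYWORDS:
--         score = sum(1 for kw in kws if kw in matched)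
--         if score > best_score:
--             best_crew, best_score = crew, score
--     return best_crew
-- ===== Notes on version B (the rewrite author's own statement) =====
-- stated objective: alternative
-- what changed: Instead of running one independent substring search per keyword into a per-crew score dict and taking max(key=...), B scans the lowered text left-to-right once, collecting at each position the set of keywords that start there, and then picks the first crew whose count of matched keywords is strictly best over an ordered (crew, keywords) table, the orchestrator default emerging from the initial accumulator.
import Mathlib
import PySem

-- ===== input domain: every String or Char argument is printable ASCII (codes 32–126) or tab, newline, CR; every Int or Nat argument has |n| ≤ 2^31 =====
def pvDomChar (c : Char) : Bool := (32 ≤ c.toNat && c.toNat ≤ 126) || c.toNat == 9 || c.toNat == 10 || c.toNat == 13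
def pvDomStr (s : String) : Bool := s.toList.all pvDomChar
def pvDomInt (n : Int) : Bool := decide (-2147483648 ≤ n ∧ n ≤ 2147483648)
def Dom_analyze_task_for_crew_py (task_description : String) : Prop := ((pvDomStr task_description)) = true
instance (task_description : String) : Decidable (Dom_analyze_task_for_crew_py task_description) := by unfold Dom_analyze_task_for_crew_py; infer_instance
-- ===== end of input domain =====

-- B replaces A's per-keyword substring searches into a score dict plus max(key=...) with a single
-- left-to-right scan of the text collecting which keywords start at each position, followed by one
-- strict-'>' pass over an ordered (crew, keywords) table (objective: alternative).

-- ===== PORT A =====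
def analyze_task_for_crew_py (task_description : String) : String :=
  let task_lower := PySem.Str.lower task_description
  let crew_scores : PySem.Dict String Nat :=
    ((((((PySem.Dict.empty.insert "backend" 0).insert "security" 0).insert "quality" 0).insert
        "deployment" 0).insert "frontend" 0).insert "integration" 0).insert "orchestrator" 0
  let backend_keywords := ["api", "backend", "database", "server", "endpoint", "model", "schema"]
  let crew_scores := crew_scores.insert "backend"
    ((backend_keywords.map (fun kw => if PySem.Str.isIn kw task_lower then 1 else 0)).sum)
  let security_keywords := ["security", "auth", "vulnerability", "encrypt", "token", "permission"]
  let crew_scores := crew_scores.insert "security"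
    ((security_keywords.map (fun kw => if PySem.Str.isIn kw task_lower then 1 else 0)).sum)
  let quality_keywords := ["test", "quality", "lint", "review", "validate", "check"]
  let crew_scores := crew_scores.insert "quality"
    ((quality_keywords.map (fun kw => if PySem.Str.isIn kw task_lower then 1 else 0)).sum)
  let deployment_keywords := ["deploy", "docker", "kubernetes", "cloud", "container", "helm"]
  let crew_scores := crew_scores.insert "deployment"
    ((deployment_keywords.map (fun kw => if PySem.Str.isIn kw task_lower then 1 else 0)).sum)
  let frontend_keywords := ["ui", "frontend", "react", "component", "style", "css"]
  let crew_scores := crew_scores.insert "frontend"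
    ((frontend_keywords.map (fun kw => if PySem.Str.isIn kw task_lower then 1 else 0)).sum)
  let integration_keywords := ["integration", "ci/cd", "pipeline", "webhook", "sync"]
  let crew_scores := crew_scores.insert "integration"
    ((integration_keywords.map (fun kw => if PySem.Str.isIn kw task_lower then 1 else 0)).sum)
  let orchestrator_keywords := ["orchestrate", "coordinate", "manage", "plan", "decompose"]
  let crew_scores := crew_scores.insert "orchestrator"
    ((orchestrator_keywords.map (fun kw => if PySem.Str.isIn kw task_lower then 1 else 0)).sum)
  let best_crew :=
    (PySem.List.max? crew_scores.keys (fun k => crew_scores.getD k 0)).getD "orchestrator"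
  let best_crew := if crew_scores.getD best_crew 0 = 0 then "orchestrator" else best_crew
  best_crew

-- ===== PORT B =====
def pvCrewKeywords : List (String × List String) :=
  [("backend", ["api", "backend", "database", "server", "endpoint", "model", "schema"]),
   ("security", ["security", "auth", "vulnerability", "encrypt", "token", "permission"]),
   ("quality", ["test", "quality", "lint", "review", "validate", "check"]),
   ("deployment", ["deploy", "docker", "kubernetes", "cloud", "container", "helm"]),
   ("frontend", ["ui", "frontend", "react", "component", "style", "css"]),
   ("integration", ["integration", "ci/cd", "pipeline", "webhook", "sync"]),
   ("orchestrator", ["orchestrate", "coordinate", "manage", "plan", "decompose"])]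

def pvAllKeywords : List String := pvCrewKeywords.flatMap (·.2)

def analyze_task_for_crew_py_alt (task_description : String) : String :=
  let t := PySem.Str.lower task_description
  let tl := t.toList
  -- for i in range(len(t)): t.startswith(kw, i) with 0 ≤ i ≤ len(t) is exactly
  -- kw.toList.isPrefixOf (tl.drop i); matched is a Python set of strings.
  let matched : PySem.Set String :=
    (List.range tl.length).foldl
      (fun m i => pvAllKeywords.foldl
        (fun m kw =>
          if !PySem.Set.contains m kw && kw.toList.isPrefixOf (tl.drop i)
          then PySem.Set.add m kw else m) m)
      PySem.Set.empty
  (pvCrewKeywords.foldl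
    (fun (acc : String × Nat) p =>
      let score := (p.2.map (fun kw => if PySem.Set.contains matched kw then 1 else 0)).sum
      if acc.2 < score then (p.1, score) else acc)
    ("orchestrator", 0)).1

-- ===== PRECONDITION & SPEC =====
def Spec_analyze_task_for_crew_py (task_description : String) (out : String) : Prop := out = analyze_task_for_crew_py_alt task_description
instance (task_description : String) (out : String) : Decidable (Spec_analyze_task_for_crew_py task_description out) := by unfold Spec_analyze_task_for_crew_py; infer_instance

-- ===== CLAIM (what is proved, stated in full; the proofs are below) =====
def Claim_equal_analyze_task_for_crew_py : Prop := ∀ (task_description : String), Dom_analyze_task_for_crew_py task_description → Spec_analyze_task_for_crew_py task_description (analyze_task_for_crew_py task_description)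

-- ===== LEMMAS AND PROOFS =====

-- selection fold over the table, parametrised by the per-keyword score
def pvFoldIsIn (task_description : String) : String :=
  let task_lower := PySem.Str.lower task_description
  (pvCrewKeywords.foldl
    (fun (acc : String × Nat) p =>
      let score := (p.2.map (fun kw => if PySem.Str.isIn kw task_lower then 1 else 0)).sum
      if acc.2 < score then (p.1, score) else acc)
    ("orchestrator", 0)).1

def pvStepA (g : String → Nat) (acc : Option String) (x : String) : Option String :=
  match acc with
  | none => some x
  | some m => if g m < g x then some x else some m

def pvStepB (acc : String × Nat) (p : String × Nat) : String × Nat :=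
  if acc.2 < p.2 then p else acc

lemma pv_maxA (g : String → Nat) (xs : List String) :
    PySem.List.max? xs g = xs.foldl (pvStepA g) none := by
  simp only [PySem.List.max?]
  congr 1
  funext acc x
  cases acc <;> rfl

lemma pv_bridge (g : String → Nat) :
    ∀ (l : List (String × Nat)), (∀ p ∈ l, g p.1 = p.2) →
    ∀ (a : String × Nat), g a.1 = a.2 →
    (if g (((l.map (·.1)).foldl (pvStepA g) (some a.1)).getD "orchestrator") = 0
      then "orchestrator"
      else ((l.map (·.1)).foldl (pvStepA g) (some a.1)).getD "orchestrator")
    = (l.foldl pvStepB (if a.2 = 0 then ("orchestrator", 0) else a)).1 := by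
  intro l
  induction l with
  | nil =>
    intro _ a ha
    by_cases h : a.2 = 0 <;> simp [ha, h]
  | cons p l ih =>
    intro hg a ha
    have hp : g p.1 = p.2 := hg p (List.mem_cons_self)
    have hg' : ∀ q ∈ l, g q.1 = q.2 := fun q hq => hg q (List.mem_cons_of_mem _ hq)
    simp only [List.map_cons, List.foldl_cons]
    by_cases hlt : a.2 < p.2
    · have h1 : pvStepA g (some a.1) p.1 = some p.1 := by
        simp [pvStepA, ha, hp, hlt]
      have h2 : pvStepB (if a.2 = 0 then ("orchestrator", 0) else a) p = p := by
        by_cases h : a.2 = 0 <;> simp [pvStepB, h] <;> omega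
      rw [h1, h2]
      have := ih hg' p hp
      rwa [if_neg (by omega : ¬ p.2 = 0)] at this
    · have h1 : pvStepA g (some a.1) p.1 = some a.1 := by
        simp [pvStepA, ha, hp, hlt]
      have h2 : pvStepB (if a.2 = 0 then ("orchestrator", 0) else a) p
          = (if a.2 = 0 then ("orchestrator", 0) else a) := by
        by_cases h : a.2 = 0 <;> simp [pvStepB, h] <;> omega
      rw [h1, h2]
      exact ih hg' a ha

lemma pv_select_main (td : String) : analyze_task_for_crew_py td = pvFoldIsIn td := by
  unfold analyze_task_for_crew_py pvFoldIsIn pvCrewKeywords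
  simp only []
  generalize (fun kw => if PySem.Str.isIn kw (PySem.Str.lower td) = true then (1 : Nat) else 0) = gf
  rw [show (fun (acc : String × Nat) (p : String × List String) =>
        if acc.2 < (List.map gf p.2).sum then (p.1, (List.map gf p.2).sum) else acc)
      = (fun (acc : String × Nat) (p : String × List String) =>
          pvStepB acc ((fun p : String × List String => (p.1, (List.map gf p.2).sum)) p))
      from rfl, ← List.foldl_map]
  simp only [List.map_cons, List.map_nil]
  generalize ([gf "api", gf "backend", gf "database", gf "server", gf "endpoint", gf "model", gf "schema"].sum : Nat) = b
  generalize ([gf "security", gf "auth", gf "vulnerability", gf "encrypt", gf "token", gf "permission"].sum : Nat) = s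
  generalize ([gf "test", gf "quality", gf "lint", gf "review", gf "validate", gf "check"].sum : Nat) = q
  generalize ([gf "deploy", gf "docker", gf "kubernetes", gf "cloud", gf "container", gf "helm"].sum : Nat) = d
  generalize ([gf "ui", gf "frontend", gf "react", gf "component", gf "style", gf "css"].sum : Nat) = f
  generalize ([gf "integration", gf "ci/cd", gf "pipeline", gf "webhook", gf "sync"].sum : Nat) = i
  generalize ([gf "orchestrate", gf "coordinate", gf "manage", gf "plan", gf "decompose"].sum : Nat) = o
  rw [show ((((((((((((((PySem.Dict.empty.insert "backend" 0).insert "security" 0).insert "quality" 0).insert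
        "deployment" 0).insert "frontend" 0).insert "integration" 0).insert "orchestrator" 0).insert
        "backend" b).insert "security" s).insert "quality" q).insert "deployment" d).insert
        "frontend" f).insert "integration" i).insert "orchestrator" o : PySem.Dict String Nat)
      = PySem.Dict.mk [("backend", b), ("security", s), ("quality", q), ("deployment", d),
          ("frontend", f), ("integration", i), ("orchestrator", o)]
    from PySem.Dict.ext (by
      simp [PySem.Dict.items_insert, PySem.Dict.contains_insert, PySem.Dict.empty])]
  set L : List (String × Nat) := [("backend", b), ("security", s), ("quality", q), ("deployment", d),
      ("frontend", f), ("integration", i), ("orchestrator", o)] with hL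
  set g : String → Nat := fun k => (PySem.Dict.mk L).getD k 0 with hg
  have hgvals : g "backend" = b ∧ g "security" = s ∧ g "quality" = q ∧ g "deployment" = d ∧
      g "frontend" = f ∧ g "integration" = i ∧ g "orchestrator" = o := by
    refine ⟨?_, ?_, ?_, ?_, ?_, ?_, ?_⟩ <;>
      simp [hg, hL, PySem.Dict.getD_eq_get?_getD, PySem.Dict.get?_mk_cons]
  obtain ⟨h1, h2, h3, h4, h5, h6, h7⟩ := hgvals
  rw [pv_maxA]
  have hkeys : (PySem.Dict.mk L).keys = ["backend", "security", "quality", "deployment",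
      "frontend", "integration", "orchestrator"] := by
    simp [hL, PySem.Dict.keys]
  rw [hkeys, List.foldl_cons, show pvStepA g none "backend" = some "backend" from rfl]
  have hstep : List.foldl pvStepB ("orchestrator", 0) L
      = List.foldl pvStepB (if b = 0 then ("orchestrator", 0) else ("backend", b))
          [("security", s), ("quality", q), ("deployment", d), ("frontend", f),
           ("integration", i), ("orchestrator", o)] := by
    rw [hL, List.foldl_cons]
    congr 1
    by_cases hb0 : b = 0
    · simp [pvStepB, hb0]
    · simp [pvStepB, Nat.pos_of_ne_zero hb0, hb0]
  rw [hstep]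
  have := pv_bridge g
      [("security", s), ("quality", q), ("deployment", d), ("frontend", f),
       ("integration", i), ("orchestrator", o)]
      (by intro p hp
          simp only [List.mem_cons, List.not_mem_nil, or_false] at hp
          rcases hp with h | h | h | h | h | h <;> subst h <;> assumption)
      ("backend", b) h1
  simpa using this

-- membership in the inner per-position fold
lemma pv_mem_inner (p : String → Bool) (ks : List String) (x : String) :
    ∀ (m : PySem.Set String),
    x ∈ ks.foldl (fun m kw => if p kw then PySem.Set.add m kw else m) m ↔
      x ∈ m ∨ (x ∈ ks ∧ p x = true) := by
  induction ks with
  | nil => intro m; simp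
  | cons kw ks ih =>
    intro m
    simp only [List.foldl_cons]
    by_cases hp : p kw = true
    · rw [if_pos hp, ih]
      simp only [PySem.Set.mem_add, List.mem_cons]
      constructor
      · rintro ((h | h) | h)
        · exact Or.inl h
        · exact Or.inr ⟨Or.inl h, h ▸ hp⟩
        · exact Or.inr ⟨Or.inr h.1, h.2⟩
      · rintro (h | ⟨(h | h), hpx⟩)
        · exact Or.inl (Or.inl h)
        · exact Or.inl (Or.inr h)
        · exact Or.inr ⟨h, hpx⟩
    · rw [if_neg hp, ih]
      simp only [List.mem_cons]
      constructor
      · rintro (h | h)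
        · exact Or.inl h
        · exact Or.inr ⟨Or.inr h.1, h.2⟩
      · rintro (h | ⟨(h | h), hpx⟩)
        · exact Or.inl h
        · exact (hp (h ▸ hpx)).elim
        · exact Or.inr ⟨h, hpx⟩

-- membership in the whole scan
lemma pv_mem_scan (q : Nat → String → Bool) (ks : List String) (x : String) :
    ∀ (idxs : List Nat) (m : PySem.Set String),
    x ∈ idxs.foldl (fun m i => ks.foldl (fun m kw => if q i kw then PySem.Set.add m kw else m) m) m ↔
      x ∈ m ∨ ∃ i ∈ idxs, x ∈ ks ∧ q i x = true := by
  intro idxs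
  induction idxs with
  | nil => intro m; simp
  | cons i idxs ih =>
    intro m
    simp only [List.foldl_cons]
    rw [ih, pv_mem_inner]
    simp only [List.mem_cons]
    constructor
    · rintro ((h | h) | ⟨j, hj, hx⟩)
      · exact Or.inl h
      · exact Or.inr ⟨i, Or.inl rfl, h⟩
      · exact Or.inr ⟨j, Or.inr hj, hx⟩
    · rintro (h | ⟨j, (rfl | hj), hx⟩)
      · exact Or.inl (Or.inl h)
      · exact Or.inl (Or.inr hx)
      · exact Or.inr ⟨j, hj, hx⟩

-- the guarded step of B's scan equals the unguarded one (Set.add is a no-op on present elements)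
lemma pv_step_eq (tl : List Char) (i : Nat) :
    (fun (m : PySem.Set String) (kw : String) =>
      if !PySem.Set.contains m kw && kw.toList.isPrefixOf (tl.drop i)
      then PySem.Set.add m kw else m)
    = (fun (m : PySem.Set String) (kw : String) =>
      if kw.toList.isPrefixOf (tl.drop i) then PySem.Set.add m kw else m) := by
  funext m kw
  by_cases hp : kw.toList.isPrefixOf (tl.drop i) = true
  · by_cases hc : PySem.Set.contains m kw = true
    · have hmem : kw ∈ m := by simpa [PySem.Set.contains] using hc
      simp [hp, PySem.Set.add_of_mem hmem]
    · rw [Bool.not_eq_true] at hc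
      have hnm : kw ∉ m := by simp [PySem.Set.contains] at hc; exact hc
      simp [hp, hnm]
  · rw [Bool.not_eq_true] at hp
    simp [hp]

-- a keyword of the table is in the matched set iff it occurs as a substring
lemma pv_scan_isIn (tl : List Char) (kw : String) (hk : kw ∈ pvAllKeywords) :
    PySem.Set.contains
      ((List.range tl.length).foldl
        (fun m i => pvAllKeywords.foldl
          (fun m kw =>
            if !PySem.Set.contains m kw && kw.toList.isPrefixOf (tl.drop i)
            then PySem.Set.add m kw else m) m)
        PySem.Set.empty) kw
    = PySem.Chars.isIn kw.toList tl := by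
  have hne : ∀ k ∈ pvAllKeywords, k.toList ≠ [] := by decide
  have hF : (fun (m : PySem.Set String) (i : Nat) => pvAllKeywords.foldl
      (fun m kw =>
        if !PySem.Set.contains m kw && kw.toList.isPrefixOf (tl.drop i)
        then PySem.Set.add m kw else m) m)
    = (fun m i => pvAllKeywords.foldl
        (fun m kw => if kw.toList.isPrefixOf (tl.drop i) then PySem.Set.add m kw else m) m) := by
    funext m i
    rw [pv_step_eq]
  rw [hF]
  set M := (List.range tl.length).foldl
      (fun m i => pvAllKeywords.foldl
        (fun m kw => if kw.toList.isPrefixOf (tl.drop i) then PySem.Set.add m kw else m) m)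
      PySem.Set.empty with hM
  have hmem : kw ∈ M ↔ kw ∈ (PySem.Set.empty : PySem.Set String) ∨
      ∃ i ∈ List.range tl.length, kw ∈ pvAllKeywords ∧
        kw.toList.isPrefixOf (tl.drop i) = true := by
    rw [hM]
    exact pv_mem_scan (fun i k => k.toList.isPrefixOf (tl.drop i)) pvAllKeywords kw
      (List.range tl.length) PySem.Set.empty
  by_cases hin : PySem.Chars.isIn kw.toList tl = true
  · rw [hin]
    obtain ⟨j, hj⟩ := (PySem.Chars.exists_prefix_drop_iff_isIn kw.toList tl).mpr hin
    have hjlt : j < tl.length := by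
      by_contra hge
      rw [List.drop_eq_nil_of_le (by omega)] at hj
      exact hne kw hk (List.prefix_nil.mp hj)
    have hmm : kw ∈ M := hmem.mpr (Or.inr ⟨j, List.mem_range.mpr hjlt, hk,
      List.isPrefixOf_iff_prefix.mpr hj⟩)
    simpa [PySem.Set.contains] using hmm
  · rw [Bool.not_eq_true] at hin
    rw [hin, ← Bool.not_eq_true]
    intro hc
    have hmm : kw ∈ M := by simpa [PySem.Set.contains] using hc
    rcases hmem.mp hmm with h | ⟨j, _, _, hpfx⟩
    · simp [PySem.Set.empty] at h
    · have := (PySem.Chars.exists_prefix_drop_iff_isIn kw.toList tl).mp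
        ⟨j, List.isPrefixOf_iff_prefix.mp hpfx⟩
      rw [hin] at this
      exact Bool.false_ne_true this

-- the selection fold only depends on the scores of the table's keywords
lemma pv_sel_congr (g g' : String → Nat)
    (h : ∀ p ∈ pvCrewKeywords, ∀ kw ∈ p.2, g kw = g' kw) :
    ∀ (acc : String × Nat),
    pvCrewKeywords.foldl (fun acc p =>
        if acc.2 < (p.2.map g).sum then (p.1, (p.2.map g).sum) else acc) acc
    = pvCrewKeywords.foldl (fun acc p =>
        if acc.2 < (p.2.map g').sum then (p.1, (p.2.map g').sum) else acc) acc := by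
  have : ∀ (l : List (String × List String)), (∀ p ∈ l, ∀ kw ∈ p.2, g kw = g' kw) →
      ∀ acc, l.foldl (fun acc p =>
          if acc.2 < (p.2.map g).sum then (p.1, (p.2.map g).sum) else acc) acc
        = l.foldl (fun acc p =>
          if acc.2 < (p.2.map g').sum then (p.1, (p.2.map g').sum) else acc) acc := by
    intro l
    induction l with
    | nil => intro _ _; rfl
    | cons p l ih =>
      intro hl acc
      have hmap : p.2.map g = p.2.map g' :=
        List.map_congr_left (hl p List.mem_cons_self)
      simp only [List.foldl_cons, hmap]
      exact ih (fun q hq => hl q (List.mem_cons_of_mem _ hq)) _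
  exact this pvCrewKeywords h

lemma pv_alt_eq_fold (td : String) : analyze_task_for_crew_py_alt td = pvFoldIsIn td := by
  unfold analyze_task_for_crew_py_alt pvFoldIsIn
  refine congrArg Prod.fst (pv_sel_congr _ _ ?_ _)
  intro p hp kw hkw
  have hk : kw ∈ pvAllKeywords := by
    unfold pvAllKeywords
    exact List.mem_flatMap.mpr ⟨p, hp, hkw⟩
  rw [pv_scan_isIn _ kw hk]
  simp [PySem.Str.isIn_eq]

-- ===== VERDICT (by name: the statement is the Claim_ definition above) =====
theorem analyze_task_for_crew_py_spec : Claim_equal_analyze_task_for_crew_py := by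
  intro td _
  unfold Spec_analyze_task_for_crew_py
  rw [pv_select_main td, pv_alt_eq_fold td]
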